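-- pv_equiv track=rewrite | github.com/Idir6380/pstal-morphtagger | src/data_preparation.py | encode_sent_chars
-- ===== SOURCE A (Python) =====
-- PAD_ID = 0
--
-- UNK_ID = 1
--
-- ESP_ID = 2
--
-- def encode_sent_chars(sent, char_vocab):
--
--     in_enc = [PAD_ID]
--     ends =  []
--
--     for i, token in enumerate(sent):
--         word = token['form']
--
--         if i > 0:
--             in_enc.append(ESP_ID)
--
--         for char in word:
--             char_id = char_vocab.get(char, UNK_ID)
--             in_enc.append(char_id)
--         ends.append(len(in_enc)-1)
--
--     return in_enc, ends
-- ===== SOURCE B (Python) =====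
-- from itertools import accumulate
--
-- PAD_ID = 0
--
-- UNK_ID = 1
--
-- ESP_ID = 2
--
-- def encode_sent_chars(sent, char_vocab):
--     encoded = [[char_vocab.get(c, UNK_ID) for c in token['form']] for token in sent]
--     ends = list(accumulate(len(w) + (1 if i > 0 else 0) for i, w in enumerate(encoded)))
--     if encoded:
--         in_enc = [PAD_ID] + encoded[0] + [x for w in encoded[1:] for x in [ESP_ID] + w]
--     else:
--         in_enc = [PAD_ID]
--     return in_enc, ends
-- ===== Notes on version B (the rewrite author's own statement) =====
-- stated objective: alternative
-- what changed: A builds in_enc and ends together in one intertwined loop with an inner per-character append; B first builds a table of encoded words, computes ends as a prefix sum (itertools.accumulate) of per-word contributions, and assembles in_enc separately by interleaving ESP_ID between the encoded words.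
-- outside the precondition, e.g. on encode_sent_chars([{}], {}): A raises KeyError, B raises KeyError
import Mathlib
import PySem

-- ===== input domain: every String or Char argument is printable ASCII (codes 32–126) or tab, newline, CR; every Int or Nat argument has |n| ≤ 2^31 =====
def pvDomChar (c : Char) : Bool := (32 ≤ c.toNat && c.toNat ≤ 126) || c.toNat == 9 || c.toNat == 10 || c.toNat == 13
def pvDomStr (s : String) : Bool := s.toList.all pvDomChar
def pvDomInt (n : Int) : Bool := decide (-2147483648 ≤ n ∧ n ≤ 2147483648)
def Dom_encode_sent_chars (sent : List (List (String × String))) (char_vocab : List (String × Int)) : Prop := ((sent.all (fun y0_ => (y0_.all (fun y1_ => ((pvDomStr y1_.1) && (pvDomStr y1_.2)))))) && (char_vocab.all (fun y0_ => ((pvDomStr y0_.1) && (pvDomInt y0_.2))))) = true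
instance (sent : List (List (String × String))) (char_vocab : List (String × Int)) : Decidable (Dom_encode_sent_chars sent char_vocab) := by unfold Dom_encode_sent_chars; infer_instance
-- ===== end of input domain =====

-- B separates the intertwined pass of A into a table of encoded words, a prefix-sum (accumulate) for the
-- word-end indices, and a separator-interleaving assembly of the id list (objective: alternative decomposition).


-- ===== PORT A =====
-- token['form']   (total via getD ""; Pre_ excludes tokens without a 'form' key, where Python raises KeyError)
def pvForm (token : List (String × String)) : String :=
  ((PySem.Dict.mk token).get? "form").getD ""

-- char_vocab.get(char, UNK_ID)   (a Python character is a 1-char string)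
def pvCharId (char_vocab : List (String × Int)) (c : Char) : Int :=
  (PySem.Dict.mk char_vocab).getD (String.ofList [c]) 1

def encode_sent_chars (sent : List (List (String × String))) (char_vocab : List (String × Int)) : List Int × List Int :=
  (PySem.List.enumerate sent 0).foldl
    (fun (st : List Int × List Int) p =>
      let word := pvForm p.2
      let in_enc := if p.1 > 0 then st.1 ++ [2] else st.1
      let in_enc := word.toList.foldl (fun acc c => acc ++ [pvCharId char_vocab c]) in_enc
      (in_enc, st.2 ++ [PySem.List.len in_enc - 1]))
    ([0], [])

-- ===== PORT B =====
-- itertools.accumulate on ints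
def pvAccGo (a : Int) : List Int → List Int
  | [] => [a]
  | y :: ys => a :: pvAccGo (a + y) ys

def pvAccumulate : List Int → List Int
  | [] => []
  | x :: xs => pvAccGo x xs

def encode_sent_chars_alt (sent : List (List (String × String))) (char_vocab : List (String × Int)) : List Int × List Int :=
  let encoded := sent.map (fun token => (pvForm token).toList.map (pvCharId char_vocab))
  let ends := pvAccumulate ((PySem.List.enumerate encoded 0).map
    (fun p => PySem.List.len p.2 + if p.1 > 0 then 1 else 0))
  let in_enc := match encoded with
    | [] => [(0 : Int)]
    | w :: ws => 0 :: (w ++ ws.flatMap (fun v => 2 :: v))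
  (in_enc, ends)

-- ===== PRECONDITION & SPEC =====
-- Pre_ excludes exactly the inputs where some token lacks a 'form' key: there Python A raises KeyError.
def Pre_encode_sent_chars (sent : List (List (String × String))) (_char_vocab : List (String × Int)) : Prop :=
  (sent.all (fun token => token.any (fun p => p.1 == "form"))) = true
instance (sent : List (List (String × String))) (char_vocab : List (String × Int)) : Decidable (Pre_encode_sent_chars sent char_vocab) := by unfold Pre_encode_sent_chars; infer_instance

def pvWitness_encode_sent_chars : (List (List (String × String))) × (List (String × Int)) :=
  ([[("form", "ab")], [("form", "c")]], [("a", 5), ("b", 7)])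

def Spec_encode_sent_chars (sent : List (List (String × String))) (char_vocab : List (String × Int)) (out : List Int × List Int) : Prop := out = encode_sent_chars_alt sent char_vocab
instance (sent : List (List (String × String))) (char_vocab : List (String × Int)) (out : List Int × List Int) : Decidable (Spec_encode_sent_chars sent char_vocab out) := by unfold Spec_encode_sent_chars; infer_instance

-- ===== CLAIM (what is proved, stated in full; the proofs are below) =====
def Claim_equal_encode_sent_chars : Prop := ∀ (sent : List (List (String × String))) (char_vocab : List (String × Int)), Dom_encode_sent_chars sent char_vocab → Pre_encode_sent_chars sent char_vocab → Spec_encode_sent_chars sent char_vocab (encode_sent_chars sent char_vocab)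

-- ===== LEMMAS AND PROOFS =====

-- encoded word of one token
def pvEncW (cv : List (String × Int)) (t : List (String × String)) : List Int :=
  (pvForm t).toList.map (pvCharId cv)

-- ends contributed by the tokens after the first, given the current length of in_enc
def pvTailEnds (n : Nat) : List (List Int) → List Int
  | [] => []
  | w :: ws => ((n + w.length : Nat) : Int) :: pvTailEnds (n + 1 + w.length) ws

lemma pvAccGo_spec (ws : List (List Int)) : ∀ (n : Nat),
    pvAccGo (n : Int) (ws.map (fun w => (w.length : Int) + 1)) =
      (n : Int) :: pvTailEnds (n + 1) ws := by
  induction ws with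
  | nil => intro n; simp [pvAccGo, pvTailEnds]
  | cons w ws ih =>
    intro n
    simp only [List.map_cons, pvAccGo, pvTailEnds]
    have h : (n : Int) + ((w.length : Int) + 1) = ((n + 1 + w.length : Nat) : Int) := by push_cast; ring
    rw [h, ih (n + 1 + w.length), show n + 1 + w.length + 1 = n + 1 + 1 + w.length from by omega]

lemma pvEnumMap_ge_one (ws : List (List Int)) : ∀ (i : Int), 1 ≤ i →
    (PySem.List.enumerate ws i).map (fun p => ((p.2.length : Int) + if p.1 > 0 then 1 else 0)) =
      ws.map (fun w => (w.length : Int) + 1) := by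
  induction ws with
  | nil => intro i hi; simp [PySem.List.enumerate_nil]
  | cons w ws ih =>
    intro i hi
    rw [PySem.List.enumerate_cons]
    simp only [List.map_cons]
    rw [if_pos (by omega), ih (i + 1) (by omega)]

lemma pvA_suffix (cv : List (String × Int)) (ts : List (List (String × String))) :
    ∀ (i : Int), 1 ≤ i → ∀ (st : List Int × List Int),
    (PySem.List.enumerate ts i).foldl
      (fun (st : List Int × List Int) p =>
        let word := pvForm p.2
        let in_enc := if p.1 > 0 then st.1 ++ [2] else st.1
        let in_enc := word.toList.foldl (fun a c => a ++ [pvCharId cv c]) in_enc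
        (in_enc, st.2 ++ [PySem.List.len in_enc - 1]))
      st
    = (st.1 ++ ts.flatMap (fun t => 2 :: pvEncW cv t),
       st.2 ++ pvTailEnds st.1.length (ts.map (pvEncW cv))) := by
  induction ts with
  | nil => intro i hi st; simp [PySem.List.enumerate_nil, pvTailEnds]
  | cons t ts ih =>
    intro i hi st
    rw [PySem.List.enumerate_cons, List.foldl_cons, ih (i + 1) (by omega)]
    simp only [if_pos (show i > 0 by omega), PySem.List.foldl_append_singleton_eq_map,
      List.flatMap_cons, List.map_cons, pvTailEnds, pvEncW, Prod.mk.injEq,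
      PySem.List.len_eq, List.length_append, List.length_cons, List.length_map]
    constructor
    · simp
    · rw [List.append_assoc, List.singleton_append]
      simp only [List.length_nil, zero_add]
      congr 1
      congr 1
      push_cast; ring

lemma pvMain (sent : List (List (String × String))) (cv : List (String × Int)) :
    encode_sent_chars sent cv = encode_sent_chars_alt sent cv := by
  cases sent with
  | nil => simp [encode_sent_chars, encode_sent_chars_alt, PySem.List.enumerate_nil, pvAccumulate]
  | cons t ts =>
    unfold encode_sent_chars encode_sent_chars_alt
    rw [PySem.List.enumerate_cons, List.foldl_cons, pvA_suffix cv ts (0 + 1) (by omega)]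
    simp only [show ¬ ((0:Int) > 0) by omega, if_false, PySem.List.foldl_append_singleton_eq_map,
      List.map_cons, PySem.List.enumerate_cons, Prod.mk.injEq, List.nil_append,
      PySem.List.len_eq]
    constructor
    · simp [pvEncW, List.flatMap_map]
    · rw [pvEnumMap_ge_one _ (0 + 1) (by omega)]
      simp only [pvAccumulate, add_zero]
      rw [pvAccGo_spec]
      simp only [List.length_cons, List.singleton_append]
      congr 1
      push_cast
      omega
-- ===== VERDICT (by name: the statement is the Claim_ definition above) =====
theorem encode_sent_chars_spec : Claim_equal_encode_sent_chars := by
  intro sent cv _ _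
  unfold Spec_encode_sent_chars
  exact pvMain sent cv
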